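-- pv_equiv track=rewrite | github.com/SusieGlitter/DBCooker_vscode | src/py/DBCode/data/benchmark/oceanbase/oceanbase_functions_scraper_V2.py | slice_until_label
-- ===== SOURCE A (Python) =====
-- def slice_until_label(block, start, stop_labels):
--     """从 start 开始收集文本，直到遇到 stop_labels"""
--     end = len(block)
--     for idx in range(start, len(block)):
--         if block[idx].strip().lower() in stop_labels:
--             end = idx
--             break
--     seg = [x for x in block[start:end] if x.strip()]
--     return " ".join(seg).strip()
-- ===== SOURCE B (Python) =====
-- def slice_until_label(block, start, stop_labels):
--     """Single fused pass over the suffix: accumulate non-blank elements until a stop label."""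
--     acc = []
--     for x in block[start:]:
--         if x.strip().lower() in stop_labels:
--             break
--         if x.strip():
--             acc.append(x)
--     return " ".join(acc).strip()
-- ===== Notes on version B (the rewrite author's own statement) =====
-- stated objective: simpler
-- what changed: A first scans indices range(start, len(block)) to locate the stop index, then re-slices block[start:end] and filters it in a second comprehension; B is a single element-wise pass over block[start:] that breaks at the first stop label and accumulates non-blank lines directly, with no index arithmetic or re-slicing.
-- intended difference: On a negative start (within -len..-1) whose suffix block[start:] contains a non-blank line and no stop label while the wrapped-over prefix does contain one, A's negative-index wraparound locates the label at a wrapped position and slices an empty segment, returning "", whereas B returns the joined suffix text, the intended 'collect from start until a stop label'. — e.g. on slice_until_label(["end", "a"], -1, ["end"]): A returns "", B returns "a"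
import Mathlib
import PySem

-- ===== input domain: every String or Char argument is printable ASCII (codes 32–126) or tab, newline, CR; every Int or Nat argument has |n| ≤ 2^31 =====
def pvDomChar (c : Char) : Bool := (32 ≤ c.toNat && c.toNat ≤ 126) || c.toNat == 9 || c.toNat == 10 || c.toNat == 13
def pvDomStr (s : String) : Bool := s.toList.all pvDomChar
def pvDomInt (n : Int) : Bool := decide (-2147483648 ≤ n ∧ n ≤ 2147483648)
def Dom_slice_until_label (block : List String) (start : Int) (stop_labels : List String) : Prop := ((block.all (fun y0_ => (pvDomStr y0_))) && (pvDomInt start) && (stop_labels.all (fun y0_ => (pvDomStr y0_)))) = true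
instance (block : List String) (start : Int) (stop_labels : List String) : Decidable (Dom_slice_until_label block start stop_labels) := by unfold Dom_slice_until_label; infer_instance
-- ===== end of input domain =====

-- B fuses A's two phases (find the stop index, then re-slice and filter) into one
-- element-wise pass over the suffix; same cost, simpler decomposition (objective: simpler).

-- ===== PORT A =====
-- the 'for idx in range(start, len(block)): if …: end = idx; break' loop
def pvFindEnd (block : List String) (stop_labels : List String) (dflt : Int) : List Int → Int
  | [] => dflt
  | idx :: rest =>
    if PySem.Str.lower (PySem.Str.strip (PySem.List.pyGetD block idx "")) ∈ stop_labels then idx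
    else pvFindEnd block stop_labels dflt rest

def slice_until_label (block : List String) (start : Int) (stop_labels : List String) : String :=
  let endI : Int :=
    pvFindEnd block stop_labels (block.length : Int)
      (PySem.List.pyRange start (block.length : Int) 1)
  let seg : List String :=
    (PySem.List.slice block (some start) (some endI)).filter
      (fun x => decide (PySem.Str.strip x ≠ ""))
  PySem.Str.strip (PySem.Str.join " " seg)

-- ===== PORT B =====
-- single pass over block[start:], stopping at the first stop label, keeping non-blank lines
def pvCollect (stop_labels : List String) : List String → List String
  | [] => []
  | x :: rest =>
    if PySem.Str.lower (PySem.Str.strip x) ∈ stop_labels then []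
    else if PySem.Str.strip x ≠ "" then x :: pvCollect stop_labels rest
    else pvCollect stop_labels rest

def slice_until_label_alt (block : List String) (start : Int) (stop_labels : List String) : String :=
  PySem.Str.strip (PySem.Str.join " "
    (pvCollect stop_labels (PySem.List.slice block (some start) none)))

-- ===== PRECONDITION & SPEC =====
-- Pre_ excludes start < -len(block), where A raises IndexError on block[idx].
def Pre_slice_until_label (block : List String) (start : Int) (stop_labels : List String) : Prop :=
  -(block.length : Int) ≤ start

instance (block : List String) (start : Int) (stop_labels : List String) : Decidable (Pre_slice_until_label block start stop_labels) := by unfold Pre_slice_until_label; infer_instance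

def pvWitness_slice_until_label : List String × Int × List String := (["a"], 0, ["end"])

-- On a negative start whose suffix block[start:] contains a non-blank line and no stop label
-- while the wrapped-over prefix does contain one, A's negative-index wraparound finds the label
-- at a wrapped position and slices an empty segment, returning "", whereas B returns the joined
-- suffix text, the intended meaning of "collect from start until a stop label".
def D_slice_until_label (block : List String) (start : Int) (stop_labels : List String) : Prop :=
  start < 0 ∧ -(block.length : Int) ≤ start ∧
  (∀ x ∈ block.drop ((block.length : Int) + start).toNat,
      PySem.Str.lower (PySem.Str.strip x) ∉ stop_labels) ∧
  (∃ x ∈ block.take ((block.length : Int) + start).toNat,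
      PySem.Str.lower (PySem.Str.strip x) ∈ stop_labels) ∧
  (∃ x ∈ block.drop ((block.length : Int) + start).toNat, PySem.Str.strip x ≠ "")

instance (block : List String) (start : Int) (stop_labels : List String) : Decidable (D_slice_until_label block start stop_labels) := by unfold D_slice_until_label; infer_instance

def Spec_slice_until_label (block : List String) (start : Int) (stop_labels : List String) (out : String) : Prop := ¬ D_slice_until_label block start stop_labels → out = slice_until_label_alt block start stop_labels
instance (block : List String) (start : Int) (stop_labels : List String) (out : String) : Decidable (Spec_slice_until_label block start stop_labels out) := by unfold Spec_slice_until_label; infer_instance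

def pvDiffWitness_slice_until_label : List String × Int × List String := (["end", "a"], -1, ["end"])
def pvDiffWitnessOut_slice_until_label : String × String := ("", "a")

-- ===== CLAIM (what is proved, stated in full; the proofs are below) =====
def Claim_unchanged_slice_until_label : Prop := ∀ (block : List String) (start : Int) (stop_labels : List String), Dom_slice_until_label block start stop_labels → Pre_slice_until_label block start stop_labels → Spec_slice_until_label block start stop_labels (slice_until_label block start stop_labels)
def Claim_changed_slice_until_label : Prop := Dom_slice_until_label (pvDiffWitness_slice_until_label.1) (pvDiffWitness_slice_until_label.2.1) (pvDiffWitness_slice_until_label.2.2) ∧ Pre_slice_until_label (pvDiffWitness_slice_until_label.1) (pvDiffWitness_slice_until_label.2.1) (pvDiffWitness_slice_until_label.2.2) ∧ D_slice_until_label (pvDiffWitness_slice_until_label.1) (pvDiffWitness_slice_until_label.2.1) (pvDiffWitness_slice_until_label.2.2) ∧ slice_until_label (pvDiffWitness_slice_until_label.1) (pvDiffWitness_slice_until_label.2.1) (pvDiffWitness_slice_until_label.2.2) = pvDiffWitnessOut_slice_until_label.1 ∧ slice_until_label_alt (pvDiffWitness_slice_until_label.1) (pvDiffWitness_slice_until_label.2.1)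 (pvDiffWitness_slice_until_label.2.2) = pvDiffWitnessOut_slice_until_label.2 ∧ pvDiffWitnessOut_slice_until_label.1 ≠ pvDiffWitnessOut_slice_until_label.2
def Claim_exact_slice_until_label : Prop := ∀ (block : List String) (start : Int) (stop_labels : List String), Dom_slice_until_label block start stop_labels → Pre_slice_until_label block start stop_labels → D_slice_until_label block start stop_labels → slice_until_label block start stop_labels ≠ slice_until_label_alt block start stop_labels

-- ===== LEMMAS AND PROOFS =====

-- the loop test / blank-line test as Bool predicates
def pvP (stop : List String) (x : String) : Bool := !decide (PySem.Str.lower (PySem.Str.strip x) ∈ stop)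
def pvQ (x : String) : Bool := decide (PySem.Str.strip x ≠ "")

lemma pvCollect_eq (stop : List String) (l : List String) :
    pvCollect stop l = (l.takeWhile (pvP stop)).filter pvQ := by
  induction l with
  | nil => rfl
  | cons x rest ih =>
    by_cases h : PySem.Str.lower (PySem.Str.strip x) ∈ stop
    · simp [pvCollect, h, List.takeWhile, pvP]
    · by_cases hq : PySem.Str.strip x ≠ ""
      · simp [pvCollect, h, hq, List.takeWhile, pvP, pvQ, ih]
      · simp [pvCollect, h, hq, List.takeWhile, pvP, pvQ, ih]

lemma pvFindEnd_append (block stop : List String) (dflt : Int) (l1 l2 : List Int) :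
    pvFindEnd block stop dflt (l1 ++ l2)
      = pvFindEnd block stop (pvFindEnd block stop dflt l2) l1 := by
  induction l1 with
  | nil => rfl
  | cons i rest ih =>
    simp only [List.cons_append, pvFindEnd]
    split <;> simp [ih]

lemma pvTakeWhile_length_lt {α : Type} (p : α → Bool) (l : List α)
    (h : l.any (fun x => !p x)) : (l.takeWhile p).length < l.length := by
  induction l with
  | nil => simp at h
  | cons x rest ih =>
    by_cases hp : p x
    · simp [List.takeWhile, hp] at h ⊢
      exact ih (by simpa [hp] using h)
    · simp [List.takeWhile, hp]

lemma pvFindEnd_nonneg (stop : List String) (dflt : Int) :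
    ∀ (suf pre : List String),
    pvFindEnd (pre ++ suf) stop dflt
        (PySem.List.pyRange (pre.length : Int) ((pre.length : Int) + (suf.length : Int)) 1)
      = if suf.any (fun x => !pvP stop x)
        then (pre.length : Int) + ((suf.takeWhile (pvP stop)).length : Int)
        else dflt := by
  intro suf
  induction suf with
  | nil => intro pre; simp [PySem.List.pyRange_one_eq_nil, pvFindEnd]
  | cons x rest ih =>
    intro pre
    rw [PySem.List.pyRange_one_cons (by push_cast [List.length_cons]; omega)]
    simp only [pvFindEnd]
    have hget : PySem.List.pyGetD (pre ++ x :: rest) (pre.length : Int) "" = x := by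
      simp [PySem.List.pyGetD_natCast, List.getD]
    rw [hget]
    by_cases h : PySem.Str.lower (PySem.Str.strip x) ∈ stop
    · simp [h, pvP, List.takeWhile]
    · have := ih (pre ++ [x])
      rw [if_neg h]
      have harr : ((pre ++ [x]).length : Int) = (pre.length : Int) + 1 := by simp
      have hrange : PySem.List.pyRange ((pre.length : Int) + 1) ((pre.length : Int) + (((x :: rest).length : Nat) : Int)) 1
          = PySem.List.pyRange ((pre ++ [x]).length : Int) (((pre ++ [x]).length : Int) + (rest.length : Int)) 1 := by
        rw [harr]; congr 1; push_cast [List.length_cons]; ring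
      rw [hrange, List.append_assoc] at *
      simp only [List.singleton_append] at this ⊢
      rw [this]
      simp [pvP, h, List.takeWhile]
      split <;> ring_nf

lemma pvFindEnd_neg (stop : List String) (dflt : Int) :
    ∀ (suf pre : List String),
    pvFindEnd (pre ++ suf) stop dflt
        (PySem.List.pyRange (-(suf.length : Int)) 0 1)
      = if suf.any (fun x => !pvP stop x)
        then (-(suf.length : Int) + ((suf.takeWhile (pvP stop)).length : Int))
        else dflt := by
  intro suf
  induction suf with
  | nil => intro pre; simp [PySem.List.pyRange_one_eq_nil, pvFindEnd]
  | cons x rest ih =>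
    intro pre
    rw [PySem.List.pyRange_one_cons (by push_cast [List.length_cons]; omega)]
    simp only [pvFindEnd]
    have hlen : ((x :: rest).length : Nat) ≤ (pre ++ x :: rest).length := by simp
    have hget : PySem.List.pyGetD (pre ++ x :: rest) (-(((x :: rest).length : Nat) : Int)) "" = x := by
      rw [PySem.List.pyGetD_neg_natCast _ _ _ (by simp) hlen]
      have : (pre ++ x :: rest).length - (x :: rest).length = pre.length := by simp
      simp only [this]
      rw [List.getElem_append_right (le_refl pre.length)]
      simp
    rw [hget]
    by_cases h : PySem.Str.lower (PySem.Str.strip x) ∈ stop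
    · simp [h, pvP, List.takeWhile]
    · have := ih (pre ++ [x])
      rw [if_neg h]
      have hrange : -(((x :: rest).length : Nat) : Int) + 1 = -((rest.length : Nat) : Int) := by
        push_cast [List.length_cons]; ring
      rw [hrange, List.append_assoc] at *
      simp only [List.singleton_append] at this ⊢
      rw [this]
      simp [pvP, h, List.takeWhile]
      split <;> ring_nf

lemma pvSlice_clamp {α : Type} (xs : List α) (a b : Int) :
    PySem.List.slice xs (some a) (some b)
      = (xs.drop (PySem.List.clampIdx xs.length a)).take
          (PySem.List.clampIdx xs.length b - PySem.List.clampIdx xs.length a) := rfl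

lemma pvLists_eq (block : List String) (start : Int) (stop : List String)
    (hpre : -(block.length : Int) ≤ start)
    (hnd : ¬ D_slice_until_label block start stop) :
    (PySem.List.slice block (some start)
        (some (pvFindEnd block stop (block.length : Int)
          (PySem.List.pyRange start (block.length : Int) 1)))).filter pvQ
      = pvCollect stop (PySem.List.slice block (some start) none) := by
  rw [pvCollect_eq, PySem.List.slice_some_none, pvSlice_clamp]
  by_cases hs : 0 ≤ start
  · by_cases hlt : start < (block.length : Int)
    · -- 0 ≤ start < n
      set j : Nat := start.toNat with hjdef
      have hc1 : PySem.List.clampIdx block.length start = j := by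
        unfold PySem.List.clampIdx; split_ifs <;> omega
      have hsplit : block.take j ++ block.drop j = block := List.take_append_drop j block
      have hfe := pvFindEnd_nonneg stop (block.length : Int) (block.drop j) (block.take j)
      rw [hsplit] at hfe
      have hlens : ((block.take j).length : Int) = start := by
        simp [List.length_take]; omega
      have hlens2 : ((block.take j).length : Int) + ((block.drop j).length : Int) = (block.length : Int) := by
        simp [List.length_take, List.length_drop]; omega
      rw [hlens2, hlens] at hfe
      rw [hfe, hc1]
      clear hfe
      by_cases hany : (block.drop j).any (fun x => !pvP stop x)
      · rw [if_pos hany]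
        have ht := pvTakeWhile_length_lt (pvP stop) (block.drop j) hany
        have hdlen : (block.drop j).length = block.length - j := List.length_drop
        have hc2 : PySem.List.clampIdx block.length (start + (((block.drop j).takeWhile (pvP stop)).length : Int))
            = j + ((block.drop j).takeWhile (pvP stop)).length := by
          unfold PySem.List.clampIdx; split_ifs <;> omega
        rw [hc2]
        have : j + ((block.drop j).takeWhile (pvP stop)).length - j = ((block.drop j).takeWhile (pvP stop)).length := by omega
        rw [this]
        congr 1
        exact (List.prefix_iff_eq_take.mp (List.takeWhile_prefix (pvP stop))).symm
      · rw [if_neg hany]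
        have hc2 : PySem.List.clampIdx block.length (block.length : Int) = block.length := by
          unfold PySem.List.clampIdx; split_ifs <;> omega
        rw [hc2]
        have htw : (block.drop j).takeWhile (pvP stop) = block.drop j := by
          rw [List.takeWhile_eq_self_iff]
          intro x hx
          by_contra hpx
          exact hany (List.any_eq_true.mpr ⟨x, hx, by simp [hpx]⟩)
        rw [htw]
        congr 1
        rw [List.take_of_length_le]
        simp [List.length_drop]
    · -- n ≤ start
      have hc1 : PySem.List.clampIdx block.length start = block.length := by
        unfold PySem.List.clampIdx; split_ifs <;> omega
      rw [PySem.List.pyRange_one_eq_nil (by omega)]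
      simp [pvFindEnd, hc1, List.drop_length]
  · -- start < 0
    replace hs : start < 0 := by omega
    set j : Nat := ((block.length : Int) + start).toNat with hjdef
    have hc1 : PySem.List.clampIdx block.length start = j := by
      unfold PySem.List.clampIdx; split_ifs <;> omega
    have hsplit : block.take j ++ block.drop j = block := List.take_append_drop j block
    have hdlen : (block.drop j).length = block.length - j := List.length_drop
    have hstart : -(((block.drop j).length : Nat) : Int) = start := by
      rw [hdlen]; omega
    rw [PySem.List.pyRange_one_append start 0 (block.length : Int) (by omega) (by omega),
        pvFindEnd_append]
    have hinner := pvFindEnd_nonneg stop (block.length : Int) block []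
    simp only [List.nil_append, List.length_nil, Nat.cast_zero, zero_add] at hinner
    rw [hinner]
    have houter := pvFindEnd_neg stop
      (if block.any (fun x => !pvP stop x)
        then ((block.takeWhile (pvP stop)).length : Int)
        else (block.length : Int)) (block.drop j) (block.take j)
    rw [hsplit, hstart] at houter
    rw [houter, hc1]
    clear houter hinner
    by_cases hany : (block.drop j).any (fun x => !pvP stop x)
    · rw [if_pos hany]
      have ht := pvTakeWhile_length_lt (pvP stop) (block.drop j) hany
      have hc2 : PySem.List.clampIdx block.length (start + (((block.drop j).takeWhile (pvP stop)).length : Int))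
          = j + ((block.drop j).takeWhile (pvP stop)).length := by
        unfold PySem.List.clampIdx; split_ifs <;> omega
      rw [hc2]
      have : j + ((block.drop j).takeWhile (pvP stop)).length - j = ((block.drop j).takeWhile (pvP stop)).length := by omega
      rw [this]
      congr 1
      exact (List.prefix_iff_eq_take.mp (List.takeWhile_prefix (pvP stop))).symm
    · rw [if_neg hany]
      have htw : (block.drop j).takeWhile (pvP stop) = block.drop j := by
        rw [List.takeWhile_eq_self_iff]
        intro x hx
        by_contra hpx
        exact hany (List.any_eq_true.mpr ⟨x, hx, by simp [hpx]⟩)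
      rw [htw]
      by_cases hball : block.any (fun x => !pvP stop x)
      · rw [if_pos hball]
        set m : Nat := (block.takeWhile (pvP stop)).length with hmdef
        have hmlt : m < block.length := pvTakeWhile_length_lt (pvP stop) block hball
        have hmj : m < j := by
          by_contra hge
          replace hge : j ≤ m := by omega
          have hpall : ∀ y ∈ block.drop j, pvP stop y = true := by
            intro y hy
            by_contra hpy
            exact hany (List.any_eq_true.mpr ⟨y, hy, by simp [hpy]⟩)
          have htweq : block.takeWhile (pvP stop) = block.take m :=
            List.prefix_iff_eq_take.mp (List.takeWhile_prefix (pvP stop))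
          have hdw : block.dropWhile (pvP stop) ≠ [] := by
            intro hnil
            have := List.takeWhile_append_dropWhile (p := pvP stop) (l := block)
            rw [hnil, List.append_nil] at this
            rw [← this] at hmlt
            omega
          have hhead := List.head_dropWhile_not (pvP stop) hdw
          have hheadmem : (block.dropWhile (pvP stop)).head hdw ∈ block.drop j := by
            have hba : block.drop j = (block.takeWhile (pvP stop)).drop j ++ block.dropWhile (pvP stop) := by
              conv_lhs => rw [← List.takeWhile_append_dropWhile (p := pvP stop) (l := block)]
              rw [List.drop_append]
              congr 1
              rw [htweq]
              have : j - (block.take m).length = 0 := by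
                simp [List.length_take]; omega
              rw [this]
              exact List.drop_zero
            rw [hba]
            exact List.mem_append_right _ (List.head_mem hdw)
          have := hpall _ hheadmem
          rw [hhead] at this
          exact absurd this (by simp)
        have hc2 : PySem.List.clampIdx block.length ((block.takeWhile (pvP stop)).length : Int) = m := by
          unfold PySem.List.clampIdx; split_ifs <;> omega
        rw [hc2]
        have hz : m - j = 0 := by omega
        rw [hz]
        simp only [List.take_zero, List.filter_nil]
        symm
        rw [List.filter_eq_nil_iff]
        intro a ha
        simp only [pvQ, decide_eq_true_eq]
        intro hne
        apply hnd
        refine ⟨hs, hpre, ?_, ?_, ⟨a, ha, hne⟩⟩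
        · intro y hy hmem
          exact hany (List.any_eq_true.mpr ⟨y, hy, by simp [pvP, hmem]⟩)
        · obtain ⟨x, hxmem, hxp⟩ := List.any_eq_true.mp hball
          have hxj : x ∈ block.take j ∨ x ∈ block.drop j := by
            rw [← hsplit] at hxmem
            exact List.mem_append.mp hxmem
          rcases hxj with hx | hx
          · exact ⟨x, hx, by simpa [pvP] using hxp⟩
          · exact absurd (List.any_eq_true.mpr ⟨x, hx, hxp⟩) hany
      · rw [if_neg hball]
        have hc2 : PySem.List.clampIdx block.length (block.length : Int) = block.length := by
          unfold PySem.List.clampIdx; split_ifs <;> omega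
        rw [hc2]
        congr 1
        rw [List.take_of_length_le]
        simp [List.length_drop]

-- ===== string lemmas for the tight claim =====

lemma pvMem_dropWhile {α : Type} (p : α → Bool) {l : List α} {x : α}
    (hx : x ∈ l) (hpx : p x = false) : x ∈ l.dropWhile p := by
  induction l with
  | nil => simp at hx
  | cons y t ih =>
    by_cases hy : p y
    · rw [List.dropWhile_cons_of_pos hy]
      rcases List.mem_cons.mp hx with rfl | hx'
      · rw [hy] at hpx; simp at hpx
      · exact ih hx'
    · rw [List.dropWhile_cons_of_neg hy]
      exact hx

lemma pvStrip_ne_nil {cs : List Char} {c : Char}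
    (hc : c ∈ cs) (hsp : PySem.Chars.isspace c = false) :
    PySem.Chars.strip cs ≠ [] := by
  intro h
  unfold PySem.Chars.strip PySem.Chars.rstrip PySem.Chars.lstrip at h
  rw [List.reverse_eq_nil_iff, List.dropWhile_eq_nil_iff] at h
  have hc1 : c ∈ (cs.dropWhile PySem.Chars.isspace).reverse :=
    List.mem_reverse.mpr (pvMem_dropWhile _ hc hsp)
  have := h c hc1
  rw [hsp] at this
  simp at this

lemma pvMem_join {c : Char} {x : String} {l : List String}
    (hx : x ∈ l) (hc : c ∈ x.toList) :
    c ∈ PySem.Chars.join (String.toList " ") (l.map String.toList) := by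
  induction l with
  | nil => simp at hx
  | cons y rest ih =>
    rcases List.mem_cons.mp hx with rfl | hx'
    · cases rest with
      | nil => simpa [PySem.Chars.join, List.intercalate] using hc
      | cons q rs =>
        rw [List.map_cons, List.map_cons, PySem.Chars.join_cons_cons]
        exact List.mem_append_left _ (List.mem_append_left _ hc)
    · cases rest with
      | nil => simp at hx'
      | cons q rs =>
        rw [List.map_cons, List.map_cons, PySem.Chars.join_cons_cons]
        exact List.mem_append_right _ (ih hx')

lemma pvStrip_join_ne {l : List String} {x : String}
    (hx : x ∈ l) (hne : PySem.Str.strip x ≠ "") :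
    PySem.Str.strip (PySem.Str.join " " l) ≠ "" := by
  -- x has a non-space character
  have hex : ∃ c ∈ x.toList, PySem.Chars.isspace c = false := by
    by_contra hall
    apply hne
    have hall' : ∀ c ∈ x.toList, PySem.Chars.isspace c = true := by
      intro c hc
      by_contra hcc
      exact hall ⟨c, hc, by simpa using hcc⟩
    have : (PySem.Str.strip x).toList = [] := by
      rw [PySem.Str.toList_strip]
      unfold PySem.Chars.strip PySem.Chars.rstrip PySem.Chars.lstrip
      rw [List.reverse_eq_nil_iff, List.dropWhile_eq_nil_iff]
      intro a ha
      exact hall' a (List.dropWhile_sublist _ |>.subset (List.mem_reverse.mp ha))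
    exact String.toList_inj.mp this
  obtain ⟨c, hc, hcsp⟩ := hex
  intro hjoin
  have : (PySem.Str.strip (PySem.Str.join " " l)).toList = [] := by
    rw [hjoin]; rfl
  rw [PySem.Str.toList_strip, PySem.Str.toList_join] at this
  exact pvStrip_ne_nil (pvMem_join hx hc) hcsp this

-- A returns "" everywhere inside D_
lemma pvA_of_D (block : List String) (start : Int) (stop : List String)
    (hd : D_slice_until_label block start stop) :
    slice_until_label block start stop = "" := by
  obtain ⟨hs, hpre, h3, h4, h5⟩ := hd
  show PySem.Str.strip (PySem.Str.join " "
    ((PySem.List.slice block (some start)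
        (some (pvFindEnd block stop (block.length : Int)
          (PySem.List.pyRange start (block.length : Int) 1)))).filter pvQ)) = ""
  set j : Nat := ((block.length : Int) + start).toNat with hjdef
  have hsplit : block.take j ++ block.drop j = block := List.take_append_drop j block
  have hdlen : (block.drop j).length = block.length - j := List.length_drop
  have hstart : -(((block.drop j).length : Nat) : Int) = start := by
    rw [hdlen]; omega
  rw [PySem.List.pyRange_one_append start 0 (block.length : Int) (by omega) (by omega),
      pvFindEnd_append]
  have hinner := pvFindEnd_nonneg stop (block.length : Int) block []
  simp only [List.nil_append, List.length_nil, Nat.cast_zero, zero_add] at hinner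
  rw [hinner]
  have houter := pvFindEnd_neg stop
    (if block.any (fun x => !pvP stop x)
      then ((block.takeWhile (pvP stop)).length : Int)
      else (block.length : Int)) (block.drop j) (block.take j)
  rw [hsplit, hstart] at houter
  rw [houter]
  clear houter hinner
  have hany : ¬ (block.drop j).any (fun x => !pvP stop x) := by
    intro h
    obtain ⟨y, hy, hpy⟩ := List.any_eq_true.mp h
    exact h3 y hy (by simpa [pvP] using hpy)
  have hball : block.any (fun x => !pvP stop x) := by
    obtain ⟨x, hx, hmem⟩ := h4
    exact List.any_eq_true.mpr ⟨x, List.mem_of_mem_take hx, by simp [pvP, hmem]⟩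
  rw [if_neg hany, if_pos hball]
  set m : Nat := (block.takeWhile (pvP stop)).length with hmdef
  have hmlt : m < block.length := pvTakeWhile_length_lt (pvP stop) block hball
  have hmj : m < j := by
    by_contra hge
    replace hge : j ≤ m := by omega
    have hpall : ∀ y ∈ block.drop j, pvP stop y = true := by
      intro y hy
      by_contra hpy
      exact hany (List.any_eq_true.mpr ⟨y, hy, by simp [hpy]⟩)
    have htweq : block.takeWhile (pvP stop) = block.take m :=
      List.prefix_iff_eq_take.mp (List.takeWhile_prefix (pvP stop))
    have hdw : block.dropWhile (pvP stop) ≠ [] := by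
      intro hnil
      have := List.takeWhile_append_dropWhile (p := pvP stop) (l := block)
      rw [hnil, List.append_nil] at this
      rw [← this] at hmlt
      omega
    have hhead := List.head_dropWhile_not (pvP stop) hdw
    have hheadmem : (block.dropWhile (pvP stop)).head hdw ∈ block.drop j := by
      have hba : block.drop j = (block.takeWhile (pvP stop)).drop j ++ block.dropWhile (pvP stop) := by
        conv_lhs => rw [← List.takeWhile_append_dropWhile (p := pvP stop) (l := block)]
        rw [List.drop_append]
        congr 1
        rw [htweq]
        have : j - (block.take m).length = 0 := by
          simp [List.length_take]; omega
        rw [this]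
        exact List.drop_zero
      rw [hba]
      exact List.mem_append_right _ (List.head_mem hdw)
    have := hpall _ hheadmem
    rw [hhead] at this
    exact absurd this (by simp)
  have hc1 : PySem.List.clampIdx block.length start = j := by
    unfold PySem.List.clampIdx; split_ifs <;> omega
  have hc2 : PySem.List.clampIdx block.length ((block.takeWhile (pvP stop)).length : Int) = m := by
    unfold PySem.List.clampIdx; split_ifs <;> omega
  rw [pvSlice_clamp, hc1, hc2]
  have hz : m - j = 0 := by omega
  rw [hz]
  simp only [List.take_zero, List.filter_nil]
  decide

-- ===== VERDICT (by name: the statement is the Claim_ definition above) =====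
theorem slice_until_label_spec : Claim_unchanged_slice_until_label := by
  intro block start stop _ hpre
  unfold Spec_slice_until_label
  intro hnd
  show PySem.Str.strip (PySem.Str.join " " _) = _
  rw [slice_until_label_alt, ← pvLists_eq block start stop hpre hnd]
  rfl

theorem slice_until_label_changed : Claim_changed_slice_until_label := by
  unfold Claim_changed_slice_until_label; decide

theorem slice_until_label_tight : Claim_exact_slice_until_label := by
  intro block start stop _ _ hd
  rw [pvA_of_D block start stop hd]
  obtain ⟨hs, hpre, h3, h4, h5⟩ := hd
  intro hB
  -- B's value is nonempty
  have hB' := hB.symm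
  unfold slice_until_label_alt at hB'
  rw [pvCollect_eq, PySem.List.slice_some_none] at hB'
  set j : Nat := ((block.length : Int) + start).toNat with hjdef
  have hc1 : PySem.List.clampIdx block.length start = j := by
    unfold PySem.List.clampIdx; split_ifs <;> omega
  rw [hc1] at hB'
  have htw : (block.drop j).takeWhile (pvP stop) = block.drop j := by
    rw [List.takeWhile_eq_self_iff]
    intro x hx
    simp [pvP, h3 x hx]
  rw [htw] at hB'
  obtain ⟨a, ha, hane⟩ := h5
  have hafilter : a ∈ (block.drop j).filter pvQ :=
    List.mem_filter.mpr ⟨ha, by simp [pvQ, hane]⟩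
  exact pvStrip_join_ne hafilter hane hB'
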